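-- pv_equiv track=rewrite | github.com/JonathanBeltranNeri/IA-P2 | Lógica/Planificación/040_Redes_Jerarquicas_Tareas.py | descomponer_tarea
-- ===== SOURCE A (Python) =====
-- tareas = {
--     "Viajar al destino": ["Llegar por tierra", "Llegar por aire"],
--     "Llegar por tierra": ["Caminar", "Camión", "Taxi"],
--     "Llegar por aire": ["Caminar", "Tren", "Avión"],
--     "Caminar": [],
--     "Camión": [],
--     "Taxi": [],
--     "Tren": [],
--     "Avión": [],
--     "Destino": []
-- }
--
-- def descomponer_tarea(tarea):
--     plan = []
--     pila = [tarea]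
--
--     while pila:
--         actual = pila.pop()
--         subtareas = tareas.get(actual, [])
--         if not subtareas:
--             plan.append(actual)
--         else:
--             pila.extend(reversed(subtareas))
--
--     return plan
-- ===== SOURCE B (Python) =====
-- tareas = {
--     "Viajar al destino": ["Llegar por tierra", "Llegar por aire"],
--     "Llegar por tierra": ["Caminar", "Camión", "Taxi"],
--     "Llegar por aire": ["Caminar", "Tren", "Avión"],
--     "Caminar": [],
--     "Camión": [],
--     "Taxi": [],
--     "Tren": [],
--     "Avión": [],
--     "Destino": []
-- }
--
-- def descomponer_tarea(tarea):
--     plan = []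
--
--     def visitar(t):
--         subtareas = tareas.get(t, [])
--         if not subtareas:
--             plan.append(t)
--         else:
--             for s in subtareas:
--                 visitar(s)
--
--     visitar(tarea)
--     return plan
-- ===== Notes on version B (the rewrite author's own statement) =====
-- stated objective: simpler
-- what changed: Replaced the explicit stack loop with reversed() extension by a direct recursive DFS helper that visits subtasks in natural left-to-right order, accumulating leaves.
import Mathlib
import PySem

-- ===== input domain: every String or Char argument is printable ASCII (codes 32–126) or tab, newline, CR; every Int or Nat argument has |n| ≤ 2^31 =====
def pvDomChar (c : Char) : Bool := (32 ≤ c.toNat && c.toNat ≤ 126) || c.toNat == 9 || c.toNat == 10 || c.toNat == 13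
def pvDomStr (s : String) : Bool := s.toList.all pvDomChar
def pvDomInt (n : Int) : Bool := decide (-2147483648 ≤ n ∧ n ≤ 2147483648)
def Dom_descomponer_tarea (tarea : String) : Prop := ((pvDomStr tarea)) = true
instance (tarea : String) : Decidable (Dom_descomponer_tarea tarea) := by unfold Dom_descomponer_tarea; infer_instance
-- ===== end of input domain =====

-- B replaces A's explicit stack loop (with reversed() extension) by a recursive DFS in
-- natural left-to-right order: simpler, same preorder leaf list.

-- the module-level dict `tareas`, shared context of both programs
def tareasTab : PySem.Dict String (List String) := PySem.Dict.ofList [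
  ("Viajar al destino", ["Llegar por tierra", "Llegar por aire"]),
  ("Llegar por tierra", ["Caminar", "Camión", "Taxi"]),
  ("Llegar por aire", ["Caminar", "Tren", "Avión"]),
  ("Caminar", []), ("Camión", []), ("Taxi", []), ("Tren", []), ("Avión", []), ("Destino", [])]

-- ===== PORT A =====
-- The stack `pila` is kept top-first, so Python's `pila.pop()` is taking the head and
-- `pila.extend(reversed(subtareas))` is `subtareas ++ rest` (exact).  The fuel only
-- totalises the while-loop; 16 exceeds the number of iterations for every input.
def descomponerA_loop (fuel : Nat) (plan : List String) (pila : List String) : List String :=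
  match fuel, pila with
  | _, [] => plan
  | 0, _ => plan
  | Nat.succ n, actual :: rest =>
      let subtareas := tareasTab.getD actual []
      if subtareas.isEmpty then descomponerA_loop n (plan ++ [actual]) rest
      else descomponerA_loop n plan (subtareas ++ rest)

def descomponer_tarea (tarea : String) : List String :=
  descomponerA_loop 16 [] [tarea]

-- ===== PORT B =====
-- recursive DFS helper `visitar` of Source B; fuel only totalises the recursion (depth ≤ 3)
def descomponerB_visitar (fuel : Nat) (t : String) (plan : List String) : List String :=
  match fuel with
  | 0 => plan
  | Nat.succ n =>
      let subtareas := tareasTab.getD t []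
      if subtareas.isEmpty then plan ++ [t]
      else subtareas.foldl (fun acc s => descomponerB_visitar n s acc) plan

def descomponer_tarea_alt (tarea : String) : List String :=
  descomponerB_visitar 4 tarea []

-- ===== PRECONDITION & SPEC =====
def Spec_descomponer_tarea (tarea : String) (out : List String) : Prop := out = descomponer_tarea_alt tarea
instance (tarea : String) (out : List String) : Decidable (Spec_descomponer_tarea tarea out) := by unfold Spec_descomponer_tarea; infer_instance

-- ===== CLAIM (what is proved, stated in full; the proofs are below) =====
def Claim_equal_descomponer_tarea : Prop := ∀ (tarea : String), Dom_descomponer_tarea tarea → Spec_descomponer_tarea tarea (descomponer_tarea tarea)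

-- ===== LEMMAS AND PROOFS =====

-- the literal dict, in normal form
theorem tab_eq : tareasTab = PySem.Dict.mk [
  ("Viajar al destino", ["Llegar por tierra", "Llegar por aire"]),
  ("Llegar por tierra", ["Caminar", "Camión", "Taxi"]),
  ("Llegar por aire", ["Caminar", "Tren", "Avión"]),
  ("Caminar", []), ("Camión", []), ("Taxi", []), ("Tren", []), ("Avión", []), ("Destino", [])] := by rfl

-- any task other than the three composite ones looks up to [] (leaf)
theorem getD_leaf (t : String) (h1 : t ≠ "Viajar al destino")
    (h2 : t ≠ "Llegar por tierra") (h3 : t ≠ "Llegar por aire") :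
    tareasTab.getD t [] = [] := by
  have g : ∀ s : String, t ≠ s → (s == t) = false := by
    intro s hs
    exact beq_eq_false_iff_ne.mpr (fun e => hs e.symm)
  simp only [tab_eq, PySem.Dict.getD_eq_get?_getD, PySem.Dict.get?_mk_cons,
    g _ h1, g _ h2, g _ h3, if_false, Bool.false_eq_true]
  split_ifs <;> rfl

-- ===== VERDICT (by name: the statement is the Claim_ definition above) =====
theorem descomponer_tarea_spec : Claim_equal_descomponer_tarea := by
  intro tarea _
  unfold Spec_descomponer_tarea
  by_cases h1 : tarea = "Viajar al destino"
  · subst h1; decide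
  by_cases h2 : tarea = "Llegar por tierra"
  · subst h2; decide
  by_cases h3 : tarea = "Llegar por aire"
  · subst h3; decide
  have hl := getD_leaf tarea h1 h2 h3
  simp [descomponer_tarea, descomponer_tarea_alt, descomponerA_loop, descomponerB_visitar, hl]
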